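-- pv_equiv track=rewrite | github.com/NachiaVivias/kyopro-tenkei-90-submit-nachia | shared-solutions/090-Tenkei90_s-Last-Problem/090-03.py | powsumFPS
-- ===== SOURCE A (Python) =====
-- MOD = 998244353
--
-- ntt_perm = [[0]]
--
-- def ntt(A,g):
--   logN = 0
--   while (1 << logN) < len(A) : logN += 1
--   N = 1 << logN
--   A += [0] * (N-len(A))
--   while len(ntt_perm) < logN + 1: ntt_perm.append([2*x for x in ntt_perm[-1]] + [2*x+1 for x in ntt_perm[-1]])
--   X = ntt_perm[logN]
--   for i in range(N):
--     if i < X[i]: A[i],A[X[i]] = A[X[i]],A[i]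
--   i = 1
--   while i < N:
--     q = pow(g,(MOD-1)//i//2,MOD)
--     qj = 1
--     for j in range(i):
--       for k in range(j,N+j,i*2):
--         A[k], A[k+i] = (A[k] + A[k+i] * qj) % MOD , (A[k] - A[k+i] * qj) % MOD
--       qj = qj * q % MOD
--     i *= 2
--
-- def powsumFPS(A,n,g):
--   if n == 0: return []
--   if n == 1: return [1]
--   N = 1
--   while N<n: N *= 2
--   hN = N//2
--   hInv = powsumFPS(A,hN,g)
--   tgA = [0] * N
--   for i in range(min(N,len(A))): tgA[i] = A[i]
--   ig = pow(g,MOD-2,MOD)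
--   ntt(tgA,g)
--   htInv = [x for x in hInv] + [0] * hN
--   ntt(htInv,g)
--   R = [tgA[i] * htInv[i] % MOD for i in range(N)]
--   ntt(R,ig)
--   R = R[hN:N] + [0] * hN
--   ntt(R,g)
--   iNN = pow(N*N%MOD,MOD-2,MOD)
--   R = [R[i] * htInv[i] % MOD * iNN % MOD for i in range(N)]
--   ntt(R,ig)
--   return hInv + R[:(n-hN)]
-- ===== SOURCE B (Python) =====
-- MOD = 998244353
--
-- def _ntt(A, g):
--   # in-place NTT primitive (same as the module helper, but the bit-reversal
--   # permutation is computed locally instead of kept in a global cache)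
--   logN = 0
--   while (1 << logN) < len(A): logN += 1
--   N = 1 << logN
--   A += [0] * (N - len(A))
--   X = [0]
--   for _ in range(logN):
--     X = [2 * x for x in X] + [2 * x + 1 for x in X]
--   for i in range(N):
--     if i < X[i]: A[i], A[X[i]] = A[X[i]], A[i]
--   i = 1
--   while i < N:
--     q = pow(g, (MOD - 1) // i // 2, MOD)
--     qj = 1
--     for j in range(i):
--       for k in range(j, N + j, i * 2):
--         A[k], A[k + i] = (A[k] + A[k + i] * qj) % MOD, (A[k] - A[k + i] * qj) % MOD
--       qj = qj * q % MOD
--     i *= 2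
--
-- def _grow(A, g, N, hInv):
--   # one doubling step: from the length-N//2 series hInv produce the full
--   # length-N correction list (the caller keeps its first half, or less at the top)
--   hN = N // 2
--   tgA = (A + [0] * N)[:N]
--   ig = pow(g, MOD - 2, MOD)
--   _ntt(tgA, g)
--   htInv = list(hInv) + [0] * hN
--   _ntt(htInv, g)
--   R = [tgA[i] * htInv[i] % MOD for i in range(N)]
--   _ntt(R, ig)
--   R = R[hN:N] + [0] * hN
--   _ntt(R, g)
--   iNN = pow(N * N % MOD, MOD - 2, MOD)
--   R = [R[i] * htInv[i] % MOD * iNN % MOD for i in range(N)]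
--   _ntt(R, ig)
--   return R
--
-- def powsumFPS(A, n, g):
--   # bottom-up: grow the answer by doubling instead of recursing by halving
--   if n <= 0: return []
--   N = 1
--   while N < n: N *= 2
--   cur = [1]
--   m = 1
--   while m < N:
--     cur = cur + _grow(A, g, 2 * m, cur)[:m]
--     m *= 2
--   return cur[:n]
-- ===== Notes on version B (the rewrite author's own statement) =====
-- stated objective: alternative
-- what changed: Replaces the top-down halving recursion by an explicit bottom-up doubling loop that grows the series from [1] through sizes 2,4,...,N with the factored-out doubling step and applies a single final truncation to n (also computes the bit-reversal permutation locally instead of a global cache).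
import Mathlib
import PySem

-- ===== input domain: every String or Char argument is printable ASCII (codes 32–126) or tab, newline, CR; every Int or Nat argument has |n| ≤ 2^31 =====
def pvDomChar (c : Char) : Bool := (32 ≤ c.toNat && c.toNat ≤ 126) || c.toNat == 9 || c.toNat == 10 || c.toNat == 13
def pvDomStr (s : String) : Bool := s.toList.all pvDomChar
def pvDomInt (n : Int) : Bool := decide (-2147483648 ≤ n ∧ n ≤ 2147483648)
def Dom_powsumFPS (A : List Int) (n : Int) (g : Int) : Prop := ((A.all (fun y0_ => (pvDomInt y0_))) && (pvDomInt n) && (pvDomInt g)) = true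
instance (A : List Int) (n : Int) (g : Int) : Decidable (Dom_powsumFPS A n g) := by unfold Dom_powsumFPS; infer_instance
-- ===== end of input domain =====

-- B rewrites the halving recursion as a bottom-up doubling loop with one final truncation; objective: alternative decomposition (same cost).
-- Shared module helpers (Python's module-level `ntt` and the builtin `pow`), used by both ports.

-- small termination facts (cited by the decreasing_by of the recursive definitions below)
theorem pvHalfDec (e : Nat) (h : ¬ e = 0) : e / 2 < e :=
  Nat.div_lt_self (Nat.pos_of_ne_zero h) one_lt_two

theorem pvLogDec (l len : Nat) (h : 2 ^ l < len) : len - 2 ^ (l + 1) < len - 2 ^ l := by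
  have h2 : 2 ^ l < 2 ^ (l + 1) := Nat.pow_lt_pow_right one_lt_two (Nat.lt_succ_self l)
  omega

theorem pvSubDec (N i : Nat) (h0 : 0 < i) (h1 : i < N) : N - 2 * i < N - i := by omega

theorem pvNextDec (N : Nat) (n : Int) (h0 : 0 < N) (h1 : (N : Int) < n) :
    (n - ((2 * N : Nat) : Int)).toNat < (n - (N : Int)).toNat := by
  have : ((N : Int)) < ((2 * N : Nat) : Int) := by push_cast; omega
  omega

-- pow(b, e, m): exact for m > 1 (always called with m = 998244353); fast binary exponentiation of b^e mod m.
def pvPowMod (b : Int) (e : Nat) (m : Int) : Int :=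
  if e = 0 then PySem.Int.mod 1 m
  else
    let r := pvPowMod b (e / 2) m
    if e % 2 = 0 then PySem.Int.mod (r * r) m else PySem.Int.mod (r * r * b) m
termination_by e
decreasing_by exact pvHalfDec e (by assumption)

-- `logN = 0; while (1 << logN) < len(A): logN += 1`
def pvLogNAux (l len : Nat) : Nat :=
  if 2 ^ l < len then pvLogNAux (l + 1) len else l
termination_by len - 2 ^ l
decreasing_by exact pvLogDec l len (by assumption)

-- ntt_perm[logN]: the bit-reversal permutation table; A's global `ntt_perm` list is a pure
-- memoization of this recurrence, so the cache does not affect values.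
def pvPermTable : Nat → List Nat
  | 0 => [0]
  | k + 1 => (pvPermTable k).map (fun x => 2 * x) ++ (pvPermTable k).map (fun x => 2 * x + 1)

-- the `i = 1; while i < N: ...; i *= 2` butterfly loop of `ntt`, state = (A, qj) per level
-- (the `0 < i` conjunct only makes the recursion total; `ntt` always starts it at i = 1)
def pvButterfly (g : Int) (N : Nat) (i : Nat) (A : List Int) : List Int :=
  if h : 0 < i ∧ i < N then
    let q := pvPowMod g (((998244353 - 1) / i) / 2) 998244353  -- (MOD-1)//i//2 on non-negative ints: Nat division is exact here
    let s := (PySem.List.pyRange 0 (i : Int) 1).foldl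
      (fun (s : List Int × Int) j =>
        let qj := s.2
        let A' := (PySem.List.pyRange j ((N : Int) + j) ((i : Int) * 2)).foldl
          (fun (A : List Int) k =>
            let ak := PySem.List.pyGetD A k 0
            let aki := PySem.List.pyGetD A (k + (i : Int)) 0
            PySem.List.pySetD
              (PySem.List.pySetD A k (PySem.Int.mod (ak + aki * qj) 998244353))
              (k + (i : Int)) (PySem.Int.mod (ak - aki * qj) 998244353))
          s.1
        (A', PySem.Int.mod (qj * q) 998244353))
      (A, 1)
    pvButterfly g N (2 * i) s.1
  else A
termination_by N - i
decreasing_by exact pvSubDec N i h.1 h.2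

-- ntt(A, g): the in-place mutation returned as a new list (Python indices here are
-- non-negative and in range, so List.getD/List.set are exact).
def pvNTT (A : List Int) (g : Int) : List Int :=
  let logN := pvLogNAux 0 A.length
  let N := 2 ^ logN
  let A1 := A ++ List.replicate (N - A.length) 0
  let X := pvPermTable logN
  let A2 := (List.range N).foldl
    (fun A i =>
      let xi := X.getD i 0
      if i < xi then (A.set i (A.getD xi 0)).set xi (A.getD i 0) else A) A1
  pvButterfly g N 1 A2

-- `N = 1; while N < n: N *= 2` (the `0 < N` conjunct only makes the recursion total; both callers start at N = 1)
def pvNext (N : Nat) (n : Int) : Nat :=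
  if h : 0 < N ∧ (N : Int) < n then pvNext (2 * N) n else N
termination_by (n - N).toNat
decreasing_by exact pvNextDec N n h.1 h.2

-- termination helper for port A's recursion (cited by decreasing_by)
theorem pvNext_half_lt (N : Nat) (n : Int) (h0 : 0 < N) (h1 : (N : Int) < n) :
    ((pvNext N n / 2 : Nat) : Int) < n := by
  rw [pvNext, dif_pos ⟨h0, h1⟩]
  by_cases hc : ((2 * N : Nat) : Int) < n
  · exact pvNext_half_lt (2 * N) n (by omega) hc
  · rw [pvNext, dif_neg (fun h => hc h.2)]
    have h2 : 2 * N / 2 = N := by omega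
    rw [h2]; exact h1
termination_by (n - N).toNat
decreasing_by
  have : ((N : Int)) < ((2 * N : Nat) : Int) := by push_cast; omega
  omega

-- ===== PORT A =====
theorem powsumFPS_dec (n : Int) (h0 : ¬ n = 0) (h1 : ¬ n = 1) :
    ((pvNext 1 n / 2 : Nat) : Int).natAbs < n.natAbs := by
  by_cases h2 : 2 ≤ n
  · have := pvNext_half_lt 1 n one_pos (by omega)
    omega
  · have hx : pvNext 1 n = 1 := by
      rw [pvNext, dif_neg (by omega)]
    rw [hx]
    omega

def powsumFPS (A : List Int) (n : Int) (g : Int) : List Int :=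
  if _h0 : n = 0 then []
  else if _h1 : n = 1 then [1]
  else
    let N := pvNext 1 n
    let hN := N / 2
    let hInv := powsumFPS A (hN : Int) g
    let tgA := (List.range (min N A.length)).foldl (fun t i => t.set i (A.getD i 0)) (List.replicate N 0)
    let ig := pvPowMod g (998244353 - 2) 998244353
    let tgA := pvNTT tgA g
    let htInv := hInv ++ List.replicate hN 0
    let htInv := pvNTT htInv g
    let R := (List.range N).map (fun i => PySem.Int.mod (tgA.getD i 0 * htInv.getD i 0) 998244353)
    let R := pvNTT R ig
    let R := PySem.List.slice R (some (hN : Int)) (some (N : Int)) ++ List.replicate hN 0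
    let R := pvNTT R g
    let iNN := pvPowMod (PySem.Int.mod ((N : Int) * (N : Int)) 998244353) (998244353 - 2) 998244353
    let R := (List.range N).map (fun i => PySem.Int.mod (PySem.Int.mod (R.getD i 0 * htInv.getD i 0) 998244353 * iNN) 998244353)
    let R := pvNTT R ig
    hInv ++ PySem.List.slice R none (some (n - (hN : Int)))
termination_by n.natAbs
decreasing_by exact powsumFPS_dec n _h0 _h1

-- ===== PORT B =====
-- _grow(A, g, N, hInv): one doubling step, returns the full length-N correction list
def pvGrow (A : List Int) (g : Int) (N : Nat) (hInv : List Int) : List Int :=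
  let hN := N / 2
  let tgA := (A ++ List.replicate N 0).take N
  let ig := pvPowMod g (998244353 - 2) 998244353
  let tgA := pvNTT tgA g
  let htInv := hInv ++ List.replicate hN 0
  let htInv := pvNTT htInv g
  let R := (List.range N).map (fun i => PySem.Int.mod (tgA.getD i 0 * htInv.getD i 0) 998244353)
  let R := pvNTT R ig
  let R := PySem.List.slice R (some (hN : Int)) (some (N : Int)) ++ List.replicate hN 0
  let R := pvNTT R g
  let iNN := pvPowMod (PySem.Int.mod ((N : Int) * (N : Int)) 998244353) (998244353 - 2) 998244353
  let R := (List.range N).map (fun i => PySem.Int.mod (PySem.Int.mod (R.getD i 0 * htInv.getD i 0) 998244353 * iNN) 998244353)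
  pvNTT R ig

-- `m = 1; while m < N: cur = cur + _grow(A, g, 2*m, cur)[:m]; m *= 2`
-- (the `0 < m` conjunct only makes the recursion total; the port starts it at m = 1)
def pvLoop (A : List Int) (g : Int) (N m : Nat) (cur : List Int) : List Int :=
  if _h : 0 < m ∧ m < N then
    pvLoop A g N (2 * m) (cur ++ (pvGrow A g (2 * m) cur).take m)
  else cur
termination_by N - m
decreasing_by exact pvSubDec N m _h.1 _h.2

def powsumFPS_alt (A : List Int) (n : Int) (g : Int) : List Int :=
  if n ≤ 0 then []
  else
    let N := pvNext 1 n
    (pvLoop A g N 1 [1]).take n.toNat  -- cur[:n] with 0 < n: exact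

-- ===== PRECONDITION & SPEC =====
def Spec_powsumFPS (A : List Int) (n : Int) (g : Int) (out : List Int) : Prop := out = powsumFPS_alt A n g
instance (A : List Int) (n : Int) (g : Int) (out : List Int) : Decidable (Spec_powsumFPS A n g out) := by unfold Spec_powsumFPS; infer_instance

-- ===== CLAIM (what is proved, stated in full; the proofs are below) =====
def Claim_equal_powsumFPS : Prop := ∀ (A : List Int) (n : Int) (g : Int), Dom_powsumFPS A n g → Spec_powsumFPS A n g (powsumFPS A n g)

-- ===== LEMMAS AND PROOFS =====


-- length preservation through the NTT pipeline
theorem pvFoldlLen {beta : Type} (f : List Int → beta → List Int)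
    (hf : ∀ a b, (f a b).length = a.length) (l : List beta) (A : List Int) :
    (l.foldl f A).length = A.length := by
  induction l generalizing A with
  | nil => rfl
  | cons b t ih => simpa [List.foldl, hf] using ih (f A b)

theorem pvButterfly_len (g : Int) (N : Nat) : ∀ (i : Nat) (A : List Int),
    (pvButterfly g N i A).length = A.length := by
  intro i A
  rw [pvButterfly]
  split
  · rename_i h
    rw [pvButterfly_len]
    -- outer fold preserves the length of the first component
    have outer : ∀ (l : List Int) (s : List Int × Int),
        ((l.foldl (fun (s : List Int × Int) j =>
          let qj := s.2
          let A' := (PySem.List.pyRange j ((N : Int) + j) ((i : Int) * 2)).foldl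
            (fun (A : List Int) k =>
              let ak := PySem.List.pyGetD A k 0
              let aki := PySem.List.pyGetD A (k + (i : Int)) 0
              PySem.List.pySetD
                (PySem.List.pySetD A k (PySem.Int.mod (ak + aki * qj) 998244353))
                (k + (i : Int)) (PySem.Int.mod (ak - aki * qj) 998244353))
            s.1
          (A', PySem.Int.mod (qj * (pvPowMod g (((998244353 - 1) / i) / 2) 998244353)) 998244353)) s).1).length
        = s.1.length := by
      intro l
      induction l with
      | nil => intro s; rfl
      | cons b t ih =>
        intro s
        rw [List.foldl_cons, ih]
        exact pvFoldlLen _ (by intro a b; simp [PySem.List.length_pySetD]) _ _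
    exact outer _ _
  · rfl
termination_by i _ => N - i
decreasing_by omega

theorem pvLogNAux_ge : ∀ (l len : Nat), len ≤ 2 ^ (pvLogNAux l len) := by
  intro l len
  rw [pvLogNAux]
  split
  · exact pvLogNAux_ge (l + 1) len
  · omega
termination_by l len => len - 2 ^ l
decreasing_by
  have h2 : 2 ^ l < 2 ^ (l + 1) := Nat.pow_lt_pow_right one_lt_two (Nat.lt_succ_self l)
  omega

theorem pvLogNAux_le (l len : Nat) (h : len ≤ 2 ^ l) : pvLogNAux l len = l := by
  rw [pvLogNAux, if_neg (by omega)]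

theorem pvLogNAux_pow : ∀ (j l : Nat), l ≤ j → pvLogNAux l (2 ^ j) = j := by
  intro j l h
  rcases Nat.lt_or_ge l j with hlt | hge
  · rw [pvLogNAux, if_pos (Nat.pow_lt_pow_right one_lt_two hlt)]
    exact pvLogNAux_pow j (l + 1) hlt
  · have : l = j := by omega
    subst this
    exact pvLogNAux_le l _ le_rfl
termination_by j l _ => j - l
decreasing_by omega

theorem pvNTT_len (A : List Int) (g : Int) :
    (pvNTT A g).length = 2 ^ (pvLogNAux 0 A.length) := by
  unfold pvNTT
  rw [pvButterfly_len]
  rw [pvFoldlLen _ (by intro a b; dsimp only; split <;> simp)]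
  have := pvLogNAux_ge 0 A.length
  simp
  omega

theorem pvGrow_len (A : List Int) (g : Int) (j : Nat) (hInv : List Int) :
    (pvGrow A g (2 ^ j) hInv).length = 2 ^ j := by
  unfold pvGrow
  rw [pvNTT_len]
  simp [pvLogNAux_pow j 0 (Nat.zero_le j)]


-- pvNext characterization
theorem pvNext_spec : ∀ (j : Nat) (n : Int), ((2 ^ j : Nat) : Int) < n →
    ∃ K, j < K ∧ pvNext (2 ^ j) n = 2 ^ K ∧ ((2 ^ (K - 1) : Nat) : Int) < n ∧ n ≤ ((2 ^ K : Nat) : Int) := by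
  intro j n h
  rw [pvNext, dif_pos ⟨Nat.two_pow_pos j, h⟩]
  have h2 : 2 * 2 ^ j = 2 ^ (j + 1) := by rw [Nat.pow_succ]; ring
  by_cases hc : ((2 ^ (j + 1) : Nat) : Int) < n
  · obtain ⟨K, hK, he, hlo, hhi⟩ := pvNext_spec (j + 1) n hc
    exact ⟨K, by omega, by rw [h2, he], hlo, hhi⟩
  · refine ⟨j + 1, by omega, ?_, by simpa using h, Int.not_lt.mp hc⟩
    rw [h2, pvNext, dif_neg (fun hh => hc hh.2)]
termination_by j n _ => (n - ((2 ^ j : Nat) : Int)).toNat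
decreasing_by
  have hp : ((2 ^ j : Nat) : Int) < ((2 ^ (j + 1) : Nat) : Int) := by
    exact_mod_cast Nat.pow_lt_pow_right one_lt_two (Nat.lt_succ_self j)
  omega

-- the two tgA constructions agree
theorem tgA_aux (A : List Int) (N : Nat) : ∀ (m : Nat), m ≤ N → m ≤ A.length →
    (List.range m).foldl (fun t i => t.set i (A.getD i 0)) (List.replicate N 0)
      = A.take m ++ List.replicate (N - m) 0 := by
  intro m
  induction m with
  | zero => intro _ _; simp
  | succ m ih =>
    intro h1 h2
    rw [List.range_succ, List.foldl_append, ih (by omega) (by omega)]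
    simp only [List.foldl_cons, List.foldl_nil]
    have hlt : m < A.length := by omega
    have hlen : (A.take m).length = m := by simp; omega
    rw [List.set_append]
    rw [if_neg (by omega)]
    have hrep : N - m = (N - (m + 1)) + 1 := by omega
    rw [hlen, Nat.sub_self, hrep, List.replicate_succ, List.set_cons_zero]
    have hgd : A.getD m 0 = A[m] := by
      simp [List.getD_eq_getElem?_getD, List.getElem?_eq_getElem hlt]
    have hts : List.take (m + 1) A = List.take m A ++ [A[m]] := by
      rw [List.take_succ]
      simp [List.getElem?_eq_getElem hlt]
    rw [hgd, hts, List.append_assoc]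
    rfl

theorem tgA_eq (A : List Int) (N : Nat) :
    (List.range (min N A.length)).foldl (fun t i => t.set i (A.getD i 0)) (List.replicate N 0)
      = (A ++ List.replicate N 0).take N := by
  rw [tgA_aux A N (min N A.length) (Nat.min_le_left _ _) (Nat.min_le_right _ _)]
  rw [List.take_append]
  rcases Nat.le_total N A.length with h | h
  · rw [Nat.min_eq_left h]
    simp [Nat.sub_eq_zero_of_le h]
  · rw [Nat.min_eq_right h]
    congr 1
    · rw [List.take_of_length_le h, List.take_length]
    · rw [List.take_replicate]
      congr 1
      omega

-- the doubling tower (proof-side description of both programs' intermediate states)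
def pvIter (A : List Int) (g : Int) : Nat → List Int
  | 0 => [1]
  | k + 1 => pvIter A g k ++ (pvGrow A g (2 ^ (k + 1)) (pvIter A g k)).take (2 ^ k)

theorem pvIter_len (A : List Int) (g : Int) : ∀ k, (pvIter A g k).length = 2 ^ k := by
  intro k
  induction k with
  | zero => rfl
  | succ k ih =>
    have hg := pvGrow_len A g (k + 1) (pvIter A g k)
    have hp : 2 ^ k ≤ 2 ^ (k + 1) := Nat.pow_le_pow_right (by omega) (by omega)
    simp [pvIter, ih, hg]
    rw [Nat.pow_succ]
    omega

-- one unfolding of port A (n outside the base cases), with tgA rewritten to B's form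
theorem powA_eq (A : List Int) (g : Int) (n : Int) (h0 : n ≠ 0) (h1 : n ≠ 1) :
    powsumFPS A n g =
      powsumFPS A (((pvNext 1 n) / 2 : Nat) : Int) g
        ++ PySem.List.slice
            (pvGrow A g (pvNext 1 n) (powsumFPS A (((pvNext 1 n) / 2 : Nat) : Int) g))
            none (some (n - (((pvNext 1 n) / 2 : Nat) : Int))) := by
  conv_lhs => rw [powsumFPS]
  rw [dif_neg h0, dif_neg h1]
  simp only [tgA_eq]
  rfl


theorem powA_pow (A : List Int) (g : Int) : ∀ (k : Nat), powsumFPS A ((2 ^ k : Nat) : Int) g = pvIter A g k := by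
  intro k
  induction k with
  | zero =>
    have h : ((2 ^ 0 : Nat) : Int) = 1 := by norm_num
    rw [h, powsumFPS, dif_neg (by norm_num), dif_pos rfl]
    rfl
  | succ k ih =>
    have hge : (2:Nat) ^ 1 ≤ 2 ^ (k + 1) := Nat.pow_le_pow_right (by omega) (by omega)
    have h0 : ((2 ^ (k + 1) : Nat) : Int) ≠ 0 := by
      have : (2:Nat) ^ 1 = 2 := by norm_num
      omega
    have h1 : ((2 ^ (k + 1) : Nat) : Int) ≠ 1 := by
      have : (2:Nat) ^ 1 = 2 := by norm_num
      omega
    rw [powA_eq A g _ h0 h1]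
    have hcast : ((2 ^ 0 : Nat) : Int) < ((2 ^ (k + 1) : Nat) : Int) := by
      exact_mod_cast Nat.pow_lt_pow_right one_lt_two (by omega)
    obtain ⟨K, hK, he, hlo, hhi⟩ := pvNext_spec 0 ((2 ^ (k + 1) : Nat) : Int) hcast
    have heq : K = k + 1 := by
      have l1 : 2 ^ (K - 1) < 2 ^ (k + 1) := by exact_mod_cast hlo
      have l2 : 2 ^ (k + 1) ≤ 2 ^ K := by exact_mod_cast hhi
      have l1' : K - 1 < k + 1 := (Nat.pow_lt_pow_iff_right one_lt_two).mp l1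
      have l2' : k + 1 ≤ K := (Nat.pow_le_pow_iff_right one_lt_two).mp l2
      omega
    subst heq
    have he1 : pvNext 1 ((2 ^ (k + 1) : Nat) : Int) = 2 ^ (k + 1) := he
    have hdiv : 2 ^ (k + 1) / 2 = 2 ^ k := by
      rw [Nat.pow_succ]; omega
    rw [he1, hdiv, ih]
    have hsub : ((2 ^ (k + 1) : Nat) : Int) - ((2 ^ k : Nat) : Int) = ((2 ^ k : Nat) : Int) := by
      push_cast
      rw [pow_succ]
      ring
    rw [hsub, PySem.List.slice_to_natCast]
    rfl

theorem pvLoop_iter (A : List Int) (g : Int) (K : Nat) : ∀ (j : Nat), j ≤ K →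
    pvLoop A g (2 ^ K) (2 ^ j) (pvIter A g j) = pvIter A g K := by
  intro j hj
  by_cases hlt : j < K
  · rw [pvLoop, dif_pos ⟨Nat.two_pow_pos j, Nat.pow_lt_pow_right one_lt_two hlt⟩]
    have h2 : 2 * 2 ^ j = 2 ^ (j + 1) := by rw [Nat.pow_succ]; ring
    rw [h2]
    exact pvLoop_iter A g K (j + 1) hlt
  · have hje : j = K := by omega
    subst hje
    rw [pvLoop, dif_neg (by omega)]
termination_by j _ => K - j
decreasing_by omega

theorem pvNTT_singleton (x g : Int) : pvNTT [x] g = [x] := by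
  unfold pvNTT
  simp only [List.length_cons, List.length_nil, pvLogNAux_le 0 1 (by norm_num)]
  simp [pvPermTable]
  rw [pvButterfly, dif_neg (by omega)]

theorem pvNTT_nil (g : Int) : pvNTT [] g = [0] := by
  unfold pvNTT
  simp only [List.length_nil, pvLogNAux_le 0 0 (by norm_num)]
  simp [pvPermTable]
  rw [pvButterfly, dif_neg (by omega)]

theorem pvGrow_one (A : List Int) (g : Int) : pvGrow A g 1 [] = [0] := by
  obtain ⟨x, hx⟩ : ∃ x, (A ++ List.replicate 1 (0:Int)).take 1 = [x] := by
    cases A <;> simp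
  unfold pvGrow
  simp only [hx, Nat.reduceDiv, List.replicate_zero, List.append_nil, pvNTT_singleton, pvNTT_nil]
  simp [List.range_succ, pvNTT_singleton]

theorem powA_zero (A : List Int) (g : Int) : powsumFPS A 0 g = [] := by
  rw [powsumFPS, dif_pos rfl]

theorem main_neg (A : List Int) (n g : Int) (hn : n ≤ -1) :
    powsumFPS A n g = powsumFPS_alt A n g := by
  have h0 : n ≠ 0 := by omega
  have h1 : n ≠ 1 := by omega
  have hx : pvNext 1 n = 1 := by
    rw [pvNext, dif_neg (by simp; omega)]
  rw [powA_eq A g n h0 h1, hx]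
  have hz : ((1 / 2 : Nat) : Int) = 0 := by norm_num
  rw [hz, powA_zero, pvGrow_one]
  obtain ⟨k, hk, hkpos⟩ : ∃ k : Nat, n = -(k : Int) ∧ 0 < k := ⟨n.natAbs, by omega, by omega⟩
  rw [powsumFPS_alt, if_pos (by omega)]
  simp only [Int.sub_zero, hk]
  rw [PySem.List.slice_to_neg_natCast _ _ hkpos]
  simp
  omega

theorem powAB_agree : ∀ (A : List Int) (n : Int) (g : Int), powsumFPS A n g = powsumFPS_alt A n g := by
  intro A n g
  by_cases h0 : n = 0
  · subst h0
    rw [powA_zero, powsumFPS_alt, if_pos (by omega)]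
  by_cases h1 : n = 1
  · subst h1
    rw [powsumFPS, dif_neg (by norm_num), dif_pos rfl]
    rw [powsumFPS_alt, if_neg (by omega)]
    have hx : pvNext 1 1 = 1 := by rw [pvNext, dif_neg (by simp)]
    have hl : pvLoop A g 1 1 [1] = [1] := by rw [pvLoop, dif_neg (by omega)]
    show ([1] : List Int) = (pvLoop A g (pvNext 1 1) 1 [1]).take (1 : Int).toNat
    rw [hx, hl]
    rfl
  by_cases hneg : n ≤ 0
  · exact main_neg A n g (by omega)
  -- n ≥ 2
  have h2 : (2 : Int) ≤ n := by omega
  have hcast : ((2 ^ 0 : Nat) : Int) < n := by norm_num; omega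
  obtain ⟨K, hK, he, hlo, hhi⟩ := pvNext_spec 0 n hcast
  have he1 : pvNext 1 n = 2 ^ K := he
  obtain ⟨j, hj⟩ : ∃ j, K = j + 1 := ⟨K - 1, by omega⟩
  subst hj
  have hdiv : 2 ^ (j + 1) / 2 = 2 ^ j := by rw [Nat.pow_succ]; omega
  rw [powA_eq A g n h0 h1, he1, hdiv, powA_pow A g j]
  rw [powsumFPS_alt, if_neg (by omega), he1]
  have hloop : pvLoop A g (2 ^ (j + 1)) 1 [1] = pvIter A g (j + 1) :=
    pvLoop_iter A g (j + 1) 0 (by omega)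
  show _ = List.take n.toNat (pvLoop A g (2 ^ (j + 1)) 1 [1])
  rw [hloop]
  -- unfold the top layer of pvIter on the right
  show pvIter A g j ++ PySem.List.slice (pvGrow A g (2 ^ (j + 1)) (pvIter A g j)) none
        (some (n - ((2 ^ j : Nat) : Int)))
      = (pvIter A g j ++ (pvGrow A g (2 ^ (j + 1)) (pvIter A g j)).take (2 ^ j)).take n.toNat
  have hlo' : ((2 ^ j : Nat) : Int) < n := by simpa only [Nat.add_sub_cancel] using hlo
  have hhi' : n ≤ ((2 ^ (j + 1) : Nat) : Int) := hhi
  have hlen : (pvIter A g j).length = 2 ^ j := pvIter_len A g j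
  have hGlen : (pvGrow A g (2 ^ (j + 1)) (pvIter A g j)).length = 2 ^ (j + 1) :=
    pvGrow_len A g (j + 1) (pvIter A g j)
  rw [PySem.List.slice_to _ (by omega)]
  conv_rhs => rw [List.take_append, List.take_of_length_le (by omega), List.take_take]
  congr 1
  have hpow : (2:Nat) ^ (j + 1) = 2 ^ j + 2 ^ j := by rw [Nat.pow_succ]; omega
  have hmin : min (n.toNat - (pvIter A g j).length) (2 ^ j) = n.toNat - 2 ^ j := by omega
  rw [hmin]
  congr 1
  omega

-- ===== VERDICT (by name: the statement is the Claim_ definition above) =====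
theorem powsumFPS_spec : Claim_equal_powsumFPS := by
  intro A n g _
  unfold Spec_powsumFPS
  exact powAB_agree A n g
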